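-- pv_equiv track=rewrite | github.com/DocAid/DocAid-API | keywords.py | feature_val
-- ===== SOURCE A (Python) =====
-- def feature_val(string):
--
--     s = ['skin_rash','continuous_sneezing','acidity','fatigue','nausea','loss_of_appetite','chest_pain','fast_heart_rate','bladder_discomfort','muscle_pain','prognosis']
--     s = ['rash','skin','sneeze','cold','acid','acidity','fatigue','nausea','loss','appetite','chest','pain','heart_rate','bladder','discomfort','muscle','pain']
--     map_dict = {
--         s[0]:set(['rash','skin','rashes','redmarks','itching','irritation','skinburn']),
--         s[1]:set(['sneeze','sneezing','cold','cough','ಸೀನು','ಕೆಮ್ಮು','ಶೀತ']),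
--         s[2]:set(['acid','acidity','burning','stomach ache','stomach pain','digestion','ಹೊಟ್ಟೆ ನೋವು']),
--         s[3]:set(['fatigue','tired','tiredness','hypertension','alwayslazy','lazy','variness','lethargy','drowsiness','ಆಯಾಸ']),
--         s[4]:set(['nausea','vomiting','sickness','puking','motion sickness','morning sickness','ವಾಕರಿಕೆ']),
--         s[5]:set(['appetite loss','lazy','sick','tired','ಜ್ವರ','ಅಸ್ವಸ್ಥ']),
--         s[6]:set(['chest','ಎದೆ ನೋವು','ಎದೆ']),
--         s[7]:set(['heart rate','rate','breath','ಆಸ್ತಮಾ']),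
--         s[8]:set(['urine','bladder','excretion','restless']),
--         s[9]:set(['muscle','body','ಕಾಲು ನೋವು'])
--     }
--
--     # k = ['ಸೀನು','ಶೀತ','ತೀಕ್ಷ್ಣತೆ','ಆಯಾಸ','ವಾಕರಿಕೆ','ಎದೆ ನೋವು','ಅಸ್ವಸ್ಥತೆ','ಜ್ವರ','ಜೊರ','ಆಸ್ತಮಾ','ಬಿಪಿ','ಕಾಲು ನೋವು']
--     arr = string.split(" ")
--     precidtion_values= [0,0,0,0,0,0,0,0,0,0]
--     for element in arr:
--         for i in range(0,10):
--             if element in map_dict[s[i]]: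
--                 precidtion_values[i] = 1
--
--
--     return precidtion_values
-- ===== SOURCE B (Python) =====
-- def feature_val(string):
--     categories = [
--         ['rash','skin','rashes','redmarks','itching','irritation','skinburn'],
--         ['sneeze','sneezing','cold','cough','\u0cb8\u0cc0\u0ca8\u0cc1','\u0c95\u0cc6\u0cae\u0ccd\u0cae\u0cc1','\u0cb6\u0cc0\u0ca4'],
--         ['acid','acidity','burning','stomach ache','stomach pain','digestion','\u0cb9\u0cc6\u0cc2\u0c9f\u0ccd\u0c9f\u0cc6 \u0ca8\u0cc6\u0cc2\u0cd5\u0cb5\u0cc1'],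
--         ['fatigue','tired','tiredness','hypertension','alwayslazy','lazy','variness','lethargy','drowsiness','\u0c86\u0caf\u0cbe\u0cb8'],
--         ['nausea','vomiting','sickness','puking','motion sickness','morning sickness','\u0cb5\u0cbe\u0c95\u0cb0\u0cbf\u0c95\u0cc6'],
--         ['appetite loss','lazy','sick','tired','\u0c9c\u0ccd\u0cb5\u0cb0','\u0c85\u0cb8\u0ccd\u0cb5\u0cb8\u0ccd\u0ca5'],
--         ['chest','\u0c8e\u0ca6\u0cc6 \u0ca8\u0cc6\u0cc2\u0cd5\u0cb5\u0cc1','\u0c8e\u0ca6\u0cc6'],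
--         ['heart rate','rate','breath','\u0c86\u0cb8\u0ccd\u0ca4\u0cae\u0cbe'],
--         ['urine','bladder','excretion','restless'],
--         ['muscle','body','\u0c95\u0cbe\u0cb2\u0cc1 \u0ca8\u0ccb\u0cb5\u0cc1'],
--     ]
--     index = {}
--     for i, kws in enumerate(categories):
--         for kw in kws:
--             index.setdefault(kw, []).append(i)
--     flags = [0] * 10
--     for w in string.split(" "):
--         for i in index.get(w, ()):
--             flags[i] = 1
--     return flags
-- ===== Notes on version B (the rewrite author's own statement) =====
-- stated objective: idiomatic
-- what changed: Instead of testing each word against all ten keyword sets, B builds one inverted index dict (keyword -> list of category indices) before the loop and flags each word's categories with a single dict lookup.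
import Mathlib
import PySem

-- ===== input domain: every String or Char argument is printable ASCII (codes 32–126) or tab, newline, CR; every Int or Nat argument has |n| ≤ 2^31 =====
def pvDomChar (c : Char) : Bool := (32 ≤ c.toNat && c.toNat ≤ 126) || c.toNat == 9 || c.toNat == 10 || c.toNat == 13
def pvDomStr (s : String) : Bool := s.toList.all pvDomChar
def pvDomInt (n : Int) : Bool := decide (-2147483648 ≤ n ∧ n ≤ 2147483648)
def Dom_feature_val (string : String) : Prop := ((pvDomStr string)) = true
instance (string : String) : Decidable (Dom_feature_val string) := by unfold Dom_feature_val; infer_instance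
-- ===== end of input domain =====

-- B replaces the per-word scan over all ten keyword sets by one inverted index
-- (keyword → list of category indices) built once before the word loop (objective: idiomatic).

-- ===== PORT A =====
-- A first binds s to a dead 11-element list and immediately rebinds it; only the
-- second binding is ported.
def sA : List String :=
  ["rash","skin","sneeze","cold","acid","acidity","fatigue","nausea","loss",
   "appetite","chest","pain","heart_rate","bladder","discomfort","muscle","pain"]

-- map_dict: keys are s[0]..s[9] (all in range and pairwise distinct, so the literal
-- indexings and the later map_dict[s[i]] lookups never raise; pyGetD/getD with
-- defaults are exact here).
def mapDictA : PySem.Dict String (PySem.Set String) :=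
  PySem.Dict.ofList
    [ (PySem.List.pyGetD sA 0 "", PySem.Set.ofList ["rash","skin","rashes","redmarks","itching","irritation","skinburn"]),
      (PySem.List.pyGetD sA 1 "", PySem.Set.ofList ["sneeze","sneezing","cold","cough","\u0cb8\u0cc0\u0ca8\u0cc1","\u0c95\u0cc6\u0cae\u0ccd\u0cae\u0cc1","\u0cb6\u0cc0\u0ca4"]),
      (PySem.List.pyGetD sA 2 "", PySem.Set.ofList ["acid","acidity","burning","stomach ache","stomach pain","digestion","\u0cb9\u0cc6\u0cc2\u0c9f\u0ccd\u0c9f\u0cc6 \u0ca8\u0cc6\u0cc2\u0cd5\u0cb5\u0cc1"]),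
      (PySem.List.pyGetD sA 3 "", PySem.Set.ofList ["fatigue","tired","tiredness","hypertension","alwayslazy","lazy","variness","lethargy","drowsiness","\u0c86\u0caf\u0cbe\u0cb8"]),
      (PySem.List.pyGetD sA 4 "", PySem.Set.ofList ["nausea","vomiting","sickness","puking","motion sickness","morning sickness","\u0cb5\u0cbe\u0c95\u0cb0\u0cbf\u0c95\u0cc6"]),
      (PySem.List.pyGetD sA 5 "", PySem.Set.ofList ["appetite loss","lazy","sick","tired","\u0c9c\u0ccd\u0cb5\u0cb0","\u0c85\u0cb8\u0ccd\u0cb5\u0cb8\u0ccd\u0ca5"]),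
      (PySem.List.pyGetD sA 6 "", PySem.Set.ofList ["chest","\u0c8e\u0ca6\u0cc6 \u0ca8\u0cc6\u0cc2\u0cd5\u0cb5\u0cc1","\u0c8e\u0ca6\u0cc6"]),
      (PySem.List.pyGetD sA 7 "", PySem.Set.ofList ["heart rate","rate","breath","\u0c86\u0cb8\u0ccd\u0ca4\u0cae\u0cbe"]),
      (PySem.List.pyGetD sA 8 "", PySem.Set.ofList ["urine","bladder","excretion","restless"]),
      (PySem.List.pyGetD sA 9 "", PySem.Set.ofList ["muscle","body","\u0c95\u0cbe\u0cb2\u0cc1 \u0ca8\u0ccb\u0cb5\u0cc1"]) ]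

def feature_val (string : String) : List Int :=
  -- split? is some for every input (the separator " " is nonempty), so .getD [] is exact
  let arr := (PySem.Str.split? string " ").getD []
  let precidtion_values : List Int := [0,0,0,0,0,0,0,0,0,0]
  arr.foldl (fun pv element =>
    (PySem.List.pyRange 0 10 1).foldl (fun pv i =>
      if PySem.Set.contains (mapDictA.getD (PySem.List.pyGetD sA i "") PySem.Set.empty) element
      then PySem.List.pySetD pv i 1 else pv) pv) precidtion_values

-- ===== PORT B =====
def catsB : List (List String) :=
  [ ["rash","skin","rashes","redmarks","itching","irritation","skinburn"],
    ["sneeze","sneezing","cold","cough","\u0cb8\u0cc0\u0ca8\u0cc1","\u0c95\u0cc6\u0cae\u0ccd\u0cae\u0cc1","\u0cb6\u0cc0\u0ca4"],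
    ["acid","acidity","burning","stomach ache","stomach pain","digestion","\u0cb9\u0cc6\u0cc2\u0c9f\u0ccd\u0c9f\u0cc6 \u0ca8\u0cc6\u0cc2\u0cd5\u0cb5\u0cc1"],
    ["fatigue","tired","tiredness","hypertension","alwayslazy","lazy","variness","lethargy","drowsiness","\u0c86\u0caf\u0cbe\u0cb8"],
    ["nausea","vomiting","sickness","puking","motion sickness","morning sickness","\u0cb5\u0cbe\u0c95\u0cb0\u0cbf\u0c95\u0cc6"],
    ["appetite loss","lazy","sick","tired","\u0c9c\u0ccd\u0cb5\u0cb0","\u0c85\u0cb8\u0ccd\u0cb5\u0cb8\u0ccd\u0ca5"],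
    ["chest","\u0c8e\u0ca6\u0cc6 \u0ca8\u0cc6\u0cc2\u0cd5\u0cb5\u0cc1","\u0c8e\u0ca6\u0cc6"],
    ["heart rate","rate","breath","\u0c86\u0cb8\u0ccd\u0ca4\u0cae\u0cbe"],
    ["urine","bladder","excretion","restless"],
    ["muscle","body","\u0c95\u0cbe\u0cb2\u0cc1 \u0ca8\u0ccb\u0cb5\u0cc1"] ]

-- the inverted index: keyword → category indices (index.setdefault(kw, []).append(i))
def indexB : PySem.Dict String (List Int) :=
  (PySem.List.enumerate catsB 0).foldl
    (fun d p => p.2.foldl (fun d kw => d.modify kw [] (· ++ [p.1])) d)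
    PySem.Dict.empty

def feature_val_alt (string : String) : List Int :=
  ((PySem.Str.split? string " ").getD []).foldl
    (fun flags w => (indexB.getD w []).foldl (fun fl i => PySem.List.pySetD fl i 1) flags)
    (List.replicate 10 0)

-- ===== PRECONDITION & SPEC =====
def Spec_feature_val (string : String) (out : List Int) : Prop := out = feature_val_alt string
instance (string : String) (out : List Int) : Decidable (Spec_feature_val string out) := by unfold Spec_feature_val; infer_instance

-- ===== CLAIM (what is proved, stated in full; the proofs are below) =====
def Claim_equal_feature_val : Prop := ∀ (string : String), Dom_feature_val string → Spec_feature_val string (feature_val string)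

-- ===== LEMMAS AND PROOFS =====

-- setting the same (nonnegative) position to 1 twice is the same as once
lemma setD_idem (a : List Int) (i : Int) (hi : 0 ≤ i) :
    PySem.List.pySetD (PySem.List.pySetD a i 1) i 1 = PySem.List.pySetD a i 1 := by
  rw [PySem.List.pySetD_of_nonneg a 1 hi, PySem.List.pySetD_of_nonneg _ 1 hi, List.set_set]

-- flag-setting over one keyword group of the inverted index collapses to a membership test
lemma seg_foldl (w : String) (kws : List String) (i : Int) (hi : 0 ≤ i) (acc : List Int) :
    (List.replicate ((kws.filter (fun k => k == w)).length) i).foldl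
        (fun fl j => PySem.List.pySetD fl j 1) acc
      = if kws.contains w then PySem.List.pySetD acc i 1 else acc := by
  induction kws generalizing acc with
  | nil => simp
  | cons k rest ih =>
      rw [List.filter_cons, List.contains_cons]
      by_cases h : k = w
      · subst h
        simp only [BEq.rfl, if_true, List.length_cons, List.replicate_succ, List.foldl_cons,
          Bool.true_or]
        rw [ih]
        by_cases hr : rest.contains k = true
        · rw [if_pos hr, setD_idem acc i hi]
        · rw [if_neg hr]
      · have h1 : (k == w) = false := by simp [h]
        have h2 : (w == k) = false := by rw [Bool.beq_comm]; exact h1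
        simp only [h1, Bool.false_eq_true, if_false, h2, Bool.false_or]
        exact ih acc

-- lookup in the dict built by the nested setdefault/append loop
lemma getD_build (cats : List (List String)) (j : Int) (d : PySem.Dict String (List Int)) (w : String) :
    ((PySem.List.enumerate cats j).foldl
        (fun d p => p.2.foldl (fun d kw => d.modify kw [] (· ++ [p.1])) d) d).getD w []
      = d.getD w [] ++ (PySem.List.enumerate cats j).flatMap
          (fun p => List.replicate ((p.2.filter (fun k => k == w)).length) p.1) := by
  induction cats generalizing j d with
  | nil => simp [PySem.List.enumerate_nil]
  | cons kws rest ih =>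
      rw [PySem.List.enumerate_cons]
      simp only [List.foldl_cons, List.flatMap_cons]
      rw [ih]
      have h1 : (kws.foldl (fun d kw => d.modify kw [] (· ++ [j])) d).getD w []
          = d.getD w [] ++ List.replicate ((kws.filter (fun k => k == w)).length) j := by
        have h2 := PySem.Dict.getD_foldl_modify_append (kws.map (fun kw => (kw, j))) d w
        rw [List.foldl_map] at h2
        simpa [List.filter_map, List.map_map, Function.comp_def] using h2
      rw [h1, List.append_assoc]

set_option maxRecDepth 40000 in
-- per word, A's scan over the ten sets equals B's inverted-index lookup
lemma step_eq (w : String) (acc : List Int) :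
    (PySem.List.pyRange 0 10 1).foldl (fun pv i =>
        if PySem.Set.contains (mapDictA.getD (PySem.List.pyGetD sA i "") PySem.Set.empty) w
        then PySem.List.pySetD pv i 1 else pv) acc
      = (indexB.getD w []).foldl (fun fl i => PySem.List.pySetD fl i 1) acc := by
  have hidx : indexB.getD w []
      = (PySem.List.enumerate catsB 0).flatMap
          (fun p => List.replicate ((p.2.filter (fun k => k == w)).length) p.1) := by
    show ((PySem.List.enumerate catsB 0).foldl
        (fun d p => p.2.foldl (fun d kw => d.modify kw [] (· ++ [p.1])) d)
        PySem.Dict.empty).getD w [] = _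
    rw [getD_build]
    simp [PySem.Dict.getD_empty]
  rw [hidx,
    show PySem.List.enumerate catsB 0 =
      [((0:Int), catsB[0]!), (1, catsB[1]!), (2, catsB[2]!), (3, catsB[3]!), (4, catsB[4]!),
       (5, catsB[5]!), (6, catsB[6]!), (7, catsB[7]!), (8, catsB[8]!), (9, catsB[9]!)] from by decide]
  simp only [List.flatMap_cons, List.flatMap_nil, List.append_nil, List.foldl_append]
  rw [seg_foldl w _ 0 (by norm_num), seg_foldl w _ 1 (by norm_num), seg_foldl w _ 2 (by norm_num),
      seg_foldl w _ 3 (by norm_num), seg_foldl w _ 4 (by norm_num), seg_foldl w _ 5 (by norm_num),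
      seg_foldl w _ 6 (by norm_num), seg_foldl w _ 7 (by norm_num), seg_foldl w _ 8 (by norm_num),
      seg_foldl w _ 9 (by norm_num)]
  rw [show PySem.List.pyRange 0 10 1 = [0,1,2,3,4,5,6,7,8,9] from by decide]
  simp only [List.foldl_cons, List.foldl_nil]
  rw [show mapDictA.getD (PySem.List.pyGetD sA 0 "") PySem.Set.empty = catsB[0]! from by decide,
      show mapDictA.getD (PySem.List.pyGetD sA 1 "") PySem.Set.empty = catsB[1]! from by decide,
      show mapDictA.getD (PySem.List.pyGetD sA 2 "") PySem.Set.empty = catsB[2]! from by decide,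
      show mapDictA.getD (PySem.List.pyGetD sA 3 "") PySem.Set.empty = catsB[3]! from by decide,
      show mapDictA.getD (PySem.List.pyGetD sA 4 "") PySem.Set.empty = catsB[4]! from by decide,
      show mapDictA.getD (PySem.List.pyGetD sA 5 "") PySem.Set.empty = catsB[5]! from by decide,
      show mapDictA.getD (PySem.List.pyGetD sA 6 "") PySem.Set.empty = catsB[6]! from by decide,
      show mapDictA.getD (PySem.List.pyGetD sA 7 "") PySem.Set.empty = catsB[7]! from by decide,
      show mapDictA.getD (PySem.List.pyGetD sA 8 "") PySem.Set.empty = catsB[8]! from by decide,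
      show mapDictA.getD (PySem.List.pyGetD sA 9 "") PySem.Set.empty = catsB[9]! from by decide]
  simp only [PySem.Set.contains]
  rfl

-- ===== VERDICT (by name: the statement is the Claim_ definition above) =====
theorem feature_val_spec : Claim_equal_feature_val := by
  intro s _
  show feature_val s = feature_val_alt s
  simp only [feature_val, feature_val_alt]
  rw [show (List.replicate 10 (0:Int)) = [0,0,0,0,0,0,0,0,0,0] from by decide]
  exact List.foldl_ext _ _ _ (fun acc w _ => step_eq w acc)
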